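-- pv_equiv track=rewrite | github.com/barstoolbluz/floxenvs | verify_category_d_helpf.py | verify_bash_helpf
-- ===== SOURCE A (Python) =====
-- def verify_bash_helpf(content, env_name):
--     """Verify bash helpf function matches pattern."""
--     # Key elements to check
--     checks = []
--
--     # Check for correct README_FILE path
--     if f'local README_FILE="$FLOX_ENV_PROJECT/README.md"' in content:
--         checks.append(("Bash README_FILE path", True))
--     else:
--         checks.append(("Bash README_FILE path", False))
--
--     # Check for correct README_URL
--     expected_url = f'local README_URL="https://raw.githubusercontent.com/barstoolbluz/floxenvs/main/{env_name}/README.md"'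
--     if expected_url in content:
--         checks.append(("Bash README_URL", True))
--     else:
--         checks.append(("Bash README_URL", False))
--
--     # Check for --help option
--     if 'if [ "$1" = "--help" ]; then' in content:
--         checks.append(("Bash --help", True))
--     else:
--         checks.append(("Bash --help", False))
--
--     # Check for --force option
--     if 'if [ "$1" = "--force" ]; then' in content:
--         checks.append(("Bash --force", True))
--     else:
--         checks.append(("Bash --force", False))
--
--     # Check for bat usage
--     if 'bat --style=auto --paging=always "$README_FILE"' in content:
--         checks.append(("Bash bat usage", True))
--     else:
--         checks.append(("Bash bat usage", False))
--
--     # Check for export -f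
--     if 'export -f helpf' in content:
--         checks.append(("Bash export", True))
--     else:
--         checks.append(("Bash export", False))
--
--     all_ok = all(check[1] for check in checks)
--
--     if all_ok:
--         return True, "Bash helpf: OK"
--     else:
--         failed = [check[0] for check in checks if not check[1]]
--         return False, f"Bash helpf: FAILED ({', '.join(failed)})"
-- ===== SOURCE B (Python) =====
-- def verify_bash_helpf(content, env_name):
--     """Verify bash helpf function matches pattern.
--
--     Recursive decomposition: instead of building a (label, bool) checks list
--     and running all()/filter/','.join passes over it, a recursive helper folds
--     the check table from the back, directly constructing the comma-joined
--     string of failed labels (None when nothing failed)."""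
--     table = (
--         ("Bash README_FILE path", 'local README_FILE="$FLOX_ENV_PROJECT/README.md"'),
--         ("Bash README_URL", f'local README_URL="https://raw.githubusercontent.com/barstoolbluz/floxenvs/main/{env_name}/README.md"'),
--         ("Bash --help", 'if [ "$1" = "--help" ]; then'),
--         ("Bash --force", 'if [ "$1" = "--force" ]; then'),
--         ("Bash bat usage", 'bat --style=auto --paging=always "$README_FILE"'),
--         ("Bash export", 'export -f helpf'),
--     )
--
--     def missing(i):
--         if i == len(table):
--             return None
--         label, pat = table[i]
--         rest = missing(i + 1)
--         if pat in content:
--             return rest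
--         return label if rest is None else label + ", " + rest
--
--     bad = missing(0)
--     if bad is None:
--         return True, "Bash helpf: OK"
--     return False, "Bash helpf: FAILED (" + bad + ")"
-- ===== Notes on version B (the rewrite author's own statement) =====
-- stated objective: simpler
-- what changed: Replaces A's six copy-pasted if/else blocks that build a (label, bool) checks list plus two derived passes (all() and a failed-label filter + ', '.join) with a recursive helper over a check table that folds back-to-front and constructs the comma-joined failure string directly, with no intermediate lists and no join.
import Mathlib
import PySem

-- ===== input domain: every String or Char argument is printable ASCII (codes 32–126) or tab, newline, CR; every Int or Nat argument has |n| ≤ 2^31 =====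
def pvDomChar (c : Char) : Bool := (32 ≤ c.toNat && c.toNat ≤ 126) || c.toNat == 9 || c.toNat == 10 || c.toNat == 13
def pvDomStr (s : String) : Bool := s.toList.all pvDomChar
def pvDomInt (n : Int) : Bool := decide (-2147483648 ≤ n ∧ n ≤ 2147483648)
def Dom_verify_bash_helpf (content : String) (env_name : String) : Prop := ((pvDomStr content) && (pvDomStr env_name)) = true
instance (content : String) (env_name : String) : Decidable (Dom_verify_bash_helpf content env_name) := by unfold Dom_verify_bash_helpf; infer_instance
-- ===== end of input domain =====

-- B replaces A's six copy-pasted if/else blocks plus all()/filter/join passes with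
-- a recursive fold over a check table that builds the joined failure string directly (simpler).

-- ===== PORT A =====
def verify_bash_helpf (content : String) (env_name : String) : Bool × String :=
  let checks : List (String × Bool) := []
  let checks := if PySem.Str.isIn "local README_FILE=\"$FLOX_ENV_PROJECT/README.md\"" content
    then checks ++ [("Bash README_FILE path", true)] else checks ++ [("Bash README_FILE path", false)]
  let expected_url := "local README_URL=\"https://raw.githubusercontent.com/barstoolbluz/floxenvs/main/" ++ env_name ++ "/README.md\""
  let checks := if PySem.Str.isIn expected_url content
    then checks ++ [("Bash README_URL", true)] else checks ++ [("Bash README_URL", false)]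
  let checks := if PySem.Str.isIn "if [ \"$1\" = \"--help\" ]; then" content
    then checks ++ [("Bash --help", true)] else checks ++ [("Bash --help", false)]
  let checks := if PySem.Str.isIn "if [ \"$1\" = \"--force\" ]; then" content
    then checks ++ [("Bash --force", true)] else checks ++ [("Bash --force", false)]
  let checks := if PySem.Str.isIn "bat --style=auto --paging=always \"$README_FILE\"" content
    then checks ++ [("Bash bat usage", true)] else checks ++ [("Bash bat usage", false)]
  let checks := if PySem.Str.isIn "export -f helpf" content
    then checks ++ [("Bash export", true)] else checks ++ [("Bash export", false)]
  let all_ok := checks.all (fun c => c.2)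
  if all_ok then (true, "Bash helpf: OK")
  else
    let failed := (checks.filter (fun c => !c.2)).map (fun c => c.1)
    (false, "Bash helpf: FAILED (" ++ PySem.Str.join ", " failed ++ ")")

-- ===== PORT B =====
-- recursive helper 'missing': folds the table from the back, building the
-- comma-joined failure string directly (none = nothing failed)
def verify_bash_helpf_alt_missing (content : String) : List (String × String) → Option String
  | [] => none
  | (label, pat) :: rest =>
      let r := verify_bash_helpf_alt_missing content rest
      if PySem.Str.isIn pat content then r
      else match r with
        | none => some label
        | some s => some (label ++ ", " ++ s)

def verify_bash_helpf_alt (content : String) (env_name : String) : Bool × String :=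
  let table : List (String × String) := [
    ("Bash README_FILE path", "local README_FILE=\"$FLOX_ENV_PROJECT/README.md\""),
    ("Bash README_URL", "local README_URL=\"https://raw.githubusercontent.com/barstoolbluz/floxenvs/main/" ++ env_name ++ "/README.md\""),
    ("Bash --help", "if [ \"$1\" = \"--help\" ]; then"),
    ("Bash --force", "if [ \"$1\" = \"--force\" ]; then"),
    ("Bash bat usage", "bat --style=auto --paging=always \"$README_FILE\""),
    ("Bash export", "export -f helpf")]
  match verify_bash_helpf_alt_missing content table with
  | none => (true, "Bash helpf: OK")
  | some bad => (false, "Bash helpf: FAILED (" ++ bad ++ ")")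

-- ===== PRECONDITION & SPEC =====
def Spec_verify_bash_helpf (content : String) (env_name : String) (out : Bool × String) : Prop := out = verify_bash_helpf_alt content env_name
instance (content : String) (env_name : String) (out : Bool × String) : Decidable (Spec_verify_bash_helpf content env_name out) := by unfold Spec_verify_bash_helpf; infer_instance

-- ===== CLAIM (what is proved, stated in full; the proofs are below) =====
def Claim_equal_verify_bash_helpf : Prop := ∀ (content : String) (env_name : String), Dom_verify_bash_helpf content env_name → Spec_verify_bash_helpf content env_name (verify_bash_helpf content env_name)

-- ===== LEMMAS AND PROOFS =====

-- ===== VERDICT (by name: the statement is the Claim_ definition above) =====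
theorem verify_bash_helpf_spec : Claim_equal_verify_bash_helpf := by
  intro content env_name _
  unfold Spec_verify_bash_helpf verify_bash_helpf verify_bash_helpf_alt
  simp only [verify_bash_helpf_alt_missing, List.nil_append]
  generalize PySem.Str.isIn "local README_FILE=\"$FLOX_ENV_PROJECT/README.md\"" content = b1
  generalize PySem.Str.isIn ("local README_URL=\"https://raw.githubusercontent.com/barstoolbluz/floxenvs/main/" ++ env_name ++ "/README.md\"") content = b2
  generalize PySem.Str.isIn "if [ \"$1\" = \"--help\" ]; then" content = b3
  generalize PySem.Str.isIn "if [ \"$1\" = \"--force\" ]; then" content = b4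
  generalize PySem.Str.isIn "bat --style=auto --paging=always \"$README_FILE\"" content = b5
  generalize PySem.Str.isIn "export -f helpf" content = b6
  cases b1 <;> cases b2 <;> cases b3 <;> cases b4 <;> cases b5 <;> cases b6 <;> rfl
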